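-- pv_equiv track=rewrite | github.com/yoavlach/LeetCode | 1146-greatest-common-divisor-of-strings/greatest-common-divisor-of-strings.py | check
-- ===== SOURCE A (Python) =====
-- def check(str1, str2):
--     gcd = ""
--     for i in range(len(str1)):
--         for j in range(i + 1, len(str1)):
--             check_str = str1[i:j]
--             str2_len, check_str_len = len(str2), len(check_str)
--             if len(str1) % (j - i) == 0 and check_str * int(len(str1) / (j - i)) == str1 and check_str_len > len(gcd) and check_str * int(str2_len / check_str_len) == str2:
--                 gcd = check_str
--                 break
--     return gcd
-- ===== SOURCE B (Python) =====
-- def check(str1, str2):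
--     n, m = len(str1), len(str2)
--     for d in range(n - 1, 0, -1):
--         if n % d == 0:
--             t = str1[:d]
--             if t * (n // d) == str1 and t * (m // d) == str2:
--                 return t
--     return ""
-- ===== Notes on version B (the rewrite author's own statement) =====
-- stated objective: faster
-- what changed: A scans all O(n^2) substrings str1[i:j] with an O(n) repetition check each; B checks only the divisor lengths d of len(str1), largest proper divisor first, testing the prefix str1[:d] as a period of both strings.
import Mathlib
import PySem

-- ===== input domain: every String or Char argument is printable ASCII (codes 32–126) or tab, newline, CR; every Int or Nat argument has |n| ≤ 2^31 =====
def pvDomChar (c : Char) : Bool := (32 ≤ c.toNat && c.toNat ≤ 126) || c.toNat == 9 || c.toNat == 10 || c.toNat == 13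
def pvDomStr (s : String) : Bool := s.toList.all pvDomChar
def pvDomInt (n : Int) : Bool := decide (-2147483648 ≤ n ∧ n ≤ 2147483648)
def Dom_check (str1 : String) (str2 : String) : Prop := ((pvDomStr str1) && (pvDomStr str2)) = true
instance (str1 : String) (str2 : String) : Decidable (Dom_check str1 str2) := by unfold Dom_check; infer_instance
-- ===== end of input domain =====

-- B replaces A's O(n^3) scan of all substrings of str1 by a scan of the divisor lengths of
-- len(str1) only, longest first (objective: faster; same return value everywhere).

-- ===== PORT A =====
-- the big `and` of A's if; `int(len(str1)/(j-i))` is exact floor division here because it is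
-- guarded by `len(str1) % (j-i) == 0`, and `int(str2_len/check_str_len)` is floor division of
-- two non-negative ints, so both are ported as floordiv
def condA (s1 s2 gcd : List Char) (i j : Int) : Bool :=
  let check_str := PySem.List.slice s1 (some i) (some j)
  (PySem.Int.mod (s1.length : Int) (j - i) == 0) &&
  (PySem.List.pyRepeat check_str (PySem.Int.floordiv (s1.length : Int) (j - i)) == s1) &&
  ((check_str.length : Int) > (gcd.length : Int)) &&
  (PySem.List.pyRepeat check_str (PySem.Int.floordiv (s2.length : Int) (check_str.length : Int)) == s2)

-- inner `for j ...` loop: `break` after the successful assignment returns the new gcd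
def innerA (s1 s2 : List Char) (i : Int) (gcd : List Char) : List Int → List Char
  | [] => gcd
  | j :: js =>
      if condA s1 s2 gcd i j then PySem.List.slice s1 (some i) (some j)
      else innerA s1 s2 i gcd js

def check (str1 : String) (str2 : String) : String :=
  let s1 := str1.toList
  let s2 := str2.toList
  String.ofList ((PySem.List.pyRange 0 (s1.length : Int) 1).foldl
    (fun gcd i => innerA s1 s2 i gcd (PySem.List.pyRange (i + 1) (s1.length : Int) 1)) [])

-- ===== PORT B =====
-- `for d in range(n-1, 0, -1): if n % d == 0: t = str1[:d]; if t*(n//d)==str1 and t*(m//d)==str2: return t`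
def loopB (s1 s2 : List Char) : List Int → List Char
  | [] => []
  | d :: ds =>
      if PySem.Int.mod (s1.length : Int) d == 0 then
        let t := PySem.List.slice s1 none (some d)
        if (PySem.List.pyRepeat t (PySem.Int.floordiv (s1.length : Int) d) == s1) &&
           (PySem.List.pyRepeat t (PySem.Int.floordiv (s2.length : Int) d) == s2) then t
        else loopB s1 s2 ds
      else loopB s1 s2 ds

def check_alt (str1 : String) (str2 : String) : String :=
  let s1 := str1.toList
  let s2 := str2.toList
  String.ofList (loopB s1 s2 (PySem.List.pyRange ((s1.length : Int) - 1) 0 (-1)))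

-- ===== PRECONDITION & SPEC =====
def Spec_check (str1 : String) (str2 : String) (out : String) : Prop := out = check_alt str1 str2
instance (str1 : String) (str2 : String) (out : String) : Decidable (Spec_check str1 str2 out) := by unfold Spec_check; infer_instance

-- ===== CLAIM (what is proved, stated in full; the proofs are below) =====
def Claim_equal_check : Prop := ∀ (str1 : String) (str2 : String), Dom_check str1 str2 → Spec_check str1 str2 (check str1 str2)

-- ===== LEMMAS AND PROOFS =====

-- `u` repeated `k` times
def rep (u : List Char) (k : ℕ) : List Char := (List.replicate k u).flatten

-- `d` is a full period of `s`
def FullP (s : List Char) (p : ℕ) : Prop :=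
  0 < p ∧ p ∣ s.length ∧ rep (s.take p) (s.length / p) = s

-- the lengths d that qualify for A's update (and for B's return)
def Qual (s1 s2 : List Char) (d : ℕ) : Prop :=
  0 < d ∧ d < s1.length ∧ s1.length % d = 0 ∧
  rep (s1.take d) (s1.length / d) = s1 ∧ rep (s1.take d) (s2.length / d) = s2

def qualB (s1 s2 : List Char) (d : ℕ) : Bool :=
  (0 < d : Bool) && (d < s1.length : Bool) && (s1.length % d == 0) &&
  (rep (s1.take d) (s1.length / d) == s1) && (rep (s1.take d) (s2.length / d) == s2)

lemma qualB_iff (s1 s2 : List Char) (d : ℕ) : qualB s1 s2 d = true ↔ Qual s1 s2 d := by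
  simp [qualB, Qual, and_assoc]

lemma rep_succ (u : List Char) (k : ℕ) : rep u (k + 1) = u ++ rep u k := by
  simp [rep, List.replicate_succ]

lemma rep_length (u : List Char) (k : ℕ) : (rep u k).length = k * u.length := by
  induction k with
  | zero => simp [rep]
  | succ k ih => simp [rep_succ, ih]; ring

lemma rep_getElem? (u : List Char) (k x : ℕ) (_hu : 0 < u.length) (hx : x < k * u.length) :
    (rep u k)[x]? = u[x % u.length]? := by
  induction k generalizing x with
  | zero => omega
  | succ k ih =>
      have hx' : x < u.length + k * u.length := by
        have h : (k + 1) * u.length = k * u.length + u.length := by ring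
        omega
      rw [rep_succ]
      by_cases h : x < u.length
      · rw [List.getElem?_append_left h, Nat.mod_eq_of_lt h]
      · rw [List.getElem?_append_right (by omega)]
        rw [ih (x - u.length) (by omega)]
        rw [← Nat.mod_eq_sub_mod (by omega)]

lemma prefix_of_rep (u s : List Char) (k : ℕ) (hk : 0 < k) (h : rep u k = s) :
    u = s.take u.length := by
  obtain ⟨k, rfl⟩ := Nat.exists_eq_succ_of_ne_zero hk.ne'
  rw [← h, rep_succ, List.take_append_of_le_length le_rfl, List.take_length]

lemma fullP_mod {s : List Char} {p : ℕ} (h : FullP s p) :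
    ∀ x, x < s.length → s[x]? = (s.take p)[x % p]? := by
  obtain ⟨hp, hdvd, hrep⟩ := h
  intro x hx
  have hlen : (s.take p).length = p := by
    simp [List.length_take]; exact Nat.le_of_dvd (by omega) hdvd
  conv_lhs => rw [← hrep]
  rw [rep_getElem? _ _ _ (by omega) (by rw [hlen]; rw [Nat.div_mul_cancel hdvd]; omega)]
  rw [hlen]

lemma mod_fullP {s : List Char} {p : ℕ} (hp : 0 < p) (hdvd : p ∣ s.length)
    (h : ∀ x, x < s.length → s[x]? = s[x % p]?) : FullP s p := by
  refine ⟨hp, hdvd, ?_⟩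
  have hple : p ≤ s.length ∨ s.length = 0 := by
    rcases Nat.eq_zero_or_pos s.length with h0 | h0
    · right; exact h0
    · left; exact Nat.le_of_dvd h0 hdvd
  apply List.ext_getElem?
  intro x
  have hlen : (s.take p).length = min p s.length := by simp
  by_cases hx : x < s.length
  · have hpl : p ≤ s.length := by omega
    have hlen' : (s.take p).length = p := by rw [hlen]; omega
    have hcnt : (s.length / p) * (s.take p).length = s.length := by
      rw [hlen', Nat.div_mul_cancel hdvd]
    rw [rep_getElem? _ _ _ (by omega) (by omega)]
    rw [hlen']
    rw [h x hx, List.getElem?_take]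
    simp [Nat.mod_lt _ hp]
  · have e1 : (rep (s.take p) (s.length / p)).length = s.length := by
      rw [rep_length, hlen]
      rcases hple with hpl | h0
      · rw [Nat.min_eq_left hpl]; rw [Nat.div_mul_cancel hdvd]
      · simp [h0]
    rw [List.getElem?_eq_none (by omega), List.getElem?_eq_none (by omega)]

-- visibility at rows that are multiples of a full period: drop is a prefix
lemma align_of_fullP {s : List Char} {p i : ℕ} (h : FullP s p) (hdvd : p ∣ i)
    (hle : i ≤ s.length) : ∀ d, i + d ≤ s.length → (s.drop i).take d = s.take d := by
  intro d hd
  apply List.ext_getElem?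
  intro t
  rw [List.getElem?_take, List.getElem?_take, List.getElem?_drop]
  by_cases ht : t < d
  · simp only [if_pos ht]
    have h1 := fullP_mod h (i + t) (by omega)
    have h2 := fullP_mod h t (by omega)
    rw [h1, h2]
    obtain ⟨c, rfl⟩ := hdvd
    obtain ⟨hp, -, -⟩ := h
    have hmm : (p * c + t) % p = t % p := by
      simp [Nat.add_mod, Nat.mul_mod_right]
    rw [hmm]
  · simp [ht]

-- the rotation lemma: a qualifying period d plus a matching copy at offset i
-- yields the full period gcd i d
lemma pvRotation {s : List Char} {d i : ℕ} (hF : FullP s d)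
    (halign : (s.drop i).take d = s.take d) (hin : i + d ≤ s.length) :
    FullP s (Nat.gcd i d) := by
  rcases Nat.eq_zero_or_pos i with rfl | hipos
  · simpa [Nat.gcd_zero_left] using hF
  have hd : 0 < d := hF.1
  have hdn : d ∣ s.length := hF.2.1
  have hdlän : d ≤ s.length := by omega
  have hmod := fullP_mod hF
  have hulen : (s.take d).length = d := by simp; omega
  -- one rotation step, from the aligned copy at offset i
  have hRi : ∀ t, (s.take d)[(t + i) % d]? = (s.take d)[t % d]? := by
    have hbase : ∀ t, t < d → (s.take d)[(t + i) % d]? = (s.take d)[t % d]? := by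
      intro t ht
      have h1 : ((s.drop i).take d)[t]? = (s.take d)[t]? := by rw [halign]
      rw [List.getElem?_take, List.getElem?_take, List.getElem?_drop, if_pos ht, if_pos ht] at h1
      rw [hmod (i + t) (by omega), hmod t (by omega)] at h1
      rw [Nat.add_comm i t] at h1
      exact h1
    intro t
    have := hbase (t % d) (Nat.mod_lt _ hd)
    rwa [Nat.mod_add_mod, Nat.mod_mod_of_dvd _ dvd_rfl] at this
  -- iterate: any multiple of i
  have hRmul : ∀ k t, (s.take d)[(t + k * i) % d]? = (s.take d)[t % d]? := by
    intro k
    induction k with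
    | zero => simp
    | succ k ih =>
        intro t
        have h1 : t + (k + 1) * i = (t + i) + k * i := by ring
        rw [h1, ih (t + i), hRi t]
  -- Bezout: some multiple of i is gcd i d modulo d
  obtain ⟨k, hk⟩ : ∃ k : ℕ, (k * i) % d = (Nat.gcd i d) % d := by
    have hbez := Nat.gcd_eq_gcd_ab i d
    set A := Nat.gcdA i d
    set B := Nat.gcdB i d
    refine ⟨(A % d).toNat, ?_⟩
    have hA : ((A % d).toNat : ℤ) = A % d := Int.toNat_of_nonneg (Int.emod_nonneg A (by exact_mod_cast hd.ne'))
    have h4 : A * i = (Nat.gcd i d : ℤ) - d * B := by rw [hbez]; ring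
    have h1 : (((A % d).toNat * i : ℕ) : ℤ) % d = ((Nat.gcd i d : ℕ) : ℤ) % d := by
      push_cast
      rw [hA]
      rw [Int.mul_emod, Int.emod_emod_of_dvd _ dvd_rfl, ← Int.mul_emod]
      rw [h4, Int.sub_mul_emod_self_left]
    have h2 : (((A % d).toNat * i : ℕ) : ℤ) % d = (((A % d).toNat * i) % d : ℕ) := by
      push_cast; ring
    have h3 : ((Nat.gcd i d : ℕ) : ℤ) % d = ((Nat.gcd i d % d : ℕ) : ℤ) := by
      push_cast; ring
    rw [h2, h3] at h1
    exact_mod_cast h1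
  set g0 := Nat.gcd i d with hg0
  have hRg : ∀ t, (s.take d)[(t + g0) % d]? = (s.take d)[t % d]? := by
    intro t
    have h1 := hRmul k t
    have h2 : (t + k * i) % d = (t + g0) % d := by
      conv_lhs => rw [Nat.add_mod, hk, ← Nat.add_mod]
    rw [h2] at h1
    exact h1
  have hRgmul : ∀ c t, (s.take d)[(t + c * g0) % d]? = (s.take d)[t % d]? := by
    intro c
    induction c with
    | zero => simp
    | succ c ih =>
        intro t
        have h1 : t + (c + 1) * g0 = (t + g0) + c * g0 := by ring
        rw [h1, ih (t + g0), hRg t]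
  have hg0d : g0 ∣ d := Nat.gcd_dvd_right i d
  have hg0pos : 0 < g0 := Nat.gcd_pos_of_pos_right i hd
  apply mod_fullP hg0pos (hg0d.trans hdn)
  intro x hx
  have hg0le : g0 ≤ d := Nat.le_of_dvd hd hg0d
  rw [hmod x hx, hmod (x % g0) (by have := Nat.mod_lt x hg0pos; omega)]
  have hsplit : x = x % g0 + x / g0 * g0 := (Nat.mod_add_div' x g0).symm
  conv_lhs => rw [hsplit]
  rw [hRgmul (x / g0) (x % g0)]

lemma fd_nat (a b : ℕ) : PySem.Int.floordiv (a : ℤ) (b : ℤ) = ((a / b : ℕ) : ℤ) := by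
  simp [PySem.Int.floordiv, Int.fdiv_eq_ediv]

lemma md_nat (a b : ℕ) : PySem.Int.mod (a : ℤ) (b : ℤ) = ((a % b : ℕ) : ℤ) := by
  simp [PySem.Int.mod, Int.fmod_eq_emod]

lemma pyRepeat_nat (u : List Char) (k : ℕ) : PySem.List.pyRepeat u ((k : ℕ) : ℤ) = rep u k := by
  simp [PySem.List.pyRepeat, rep]

-- ----- characterizing B -----

lemma loopB_eq_findGreatest (s1 s2 : List Char) (c : ℕ) (hc : c < s1.length) :
    loopB s1 s2 (PySem.List.pyRange (c : Int) 0 (-1)) =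
      s1.take (Nat.findGreatest (fun d => qualB s1 s2 d = true) c) := by
  induction c with
  | zero =>
      rw [PySem.List.pyRange_neg_one_eq_nil (by simp)]
      simp [loopB]
  | succ c ih =>
      rw [PySem.List.pyRange_neg_one_cons (by positivity)]
      have hcast : ((c + 1 : ℕ) : ℤ) - 1 = ((c : ℕ) : ℤ) := by push_cast; ring
      rw [hcast]
      have hrec := ih (by omega)
      have hc1 : c + 1 < s1.length := hc
      have hslice : PySem.List.slice s1 none (some ((c + 1 : ℕ) : ℤ)) = s1.take (c + 1) :=
        PySem.List.slice_to_natCast s1 (c + 1)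
      rw [loopB, Nat.findGreatest_succ]
      simp only [hslice, md_nat, fd_nat, pyRepeat_nat]
      by_cases hmod : s1.length % (c + 1) = 0
      · simp only [hmod, Nat.cast_zero, beq_self_eq_true, if_true]
        by_cases hq : qualB s1 s2 (c + 1) = true
        · have hq' := (qualB_iff _ _ _).mp hq
          rw [if_pos hq]
          have h1 : rep (s1.take (c + 1)) (s1.length / (c + 1)) = s1 := hq'.2.2.2.1
          have h2 : rep (s1.take (c + 1)) (s2.length / (c + 1)) = s2 := hq'.2.2.2.2
          simp [h1, h2]
        · rw [if_neg hq]
          have hq2 : ¬(rep (s1.take (c + 1)) (s1.length / (c + 1)) = s1 ∧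
              rep (s1.take (c + 1)) (s2.length / (c + 1)) = s2) := by
            intro ⟨h1, h2⟩
            exact hq ((qualB_iff _ _ _).mpr ⟨by omega, hc, hmod, h1, h2⟩)
          by_cases h1 : rep (s1.take (c + 1)) (s1.length / (c + 1)) = s1
          · have h2 : ¬ rep (s1.take (c + 1)) (s2.length / (c + 1)) = s2 := fun h2 => hq2 ⟨h1, h2⟩
            simpa [h1, h2] using hrec
          · simpa [h1] using hrec
      · have hq : ¬ qualB s1 s2 (c + 1) = true := by
          intro hq; exact hmod ((qualB_iff _ _ _).mp hq).2.2.1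
        rw [if_neg hq]
        have : (((s1.length % (c + 1) : ℕ) : ℤ) == 0) = false := by
          rw [beq_eq_false_iff_ne]
          exact_mod_cast hmod
        rw [if_neg (by rw [this]; exact Bool.false_ne_true)]
        exact hrec

-- ----- characterizing A -----

-- the Nat-level content of condA for an in-range pair (i, i+d)
def CondN (s1 s2 : List Char) (G i d : ℕ) : Prop :=
  s1.length % d = 0 ∧ rep ((s1.drop i).take d) (s1.length / d) = s1 ∧
  G < d ∧ rep ((s1.drop i).take d) (s2.length / d) = s2

lemma condA_iff_condN (s1 s2 g : List Char) (i j : Int) (hi : 0 ≤ i) (hij : i < j)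
    (hj : j ≤ (s1.length : Int)) :
    condA s1 s2 g i j = true ↔ CondN s1 s2 g.length i.toNat (j.toNat - i.toNat) := by
  obtain ⟨I, rfl⟩ := Int.eq_ofNat_of_zero_le hi
  obtain ⟨J, rfl⟩ := Int.eq_ofNat_of_zero_le (le_trans hi hij.le)
  have hIJ : I < J := by exact_mod_cast hij
  have hJn : J ≤ s1.length := by exact_mod_cast hj
  have hslice : PySem.List.slice s1 (some ((I : ℕ) : ℤ)) (some ((J : ℕ) : ℤ)) =
      (s1.drop I).take (J - I) := PySem.List.slice_natCast s1 I J
  have hdiff : ((J : ℕ) : ℤ) - ((I : ℕ) : ℤ) = (((J - I : ℕ)) : ℤ) := by omega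
  have hlen : ((s1.drop I).take (J - I)).length = J - I := by
    simp [List.length_take, List.length_drop]; omega
  rw [condA]
  simp only [hslice, hdiff, hlen, md_nat, fd_nat, pyRepeat_nat, Int.toNat_natCast]
  simp only [Bool.and_eq_true, beq_iff_eq, decide_eq_true_eq, CondN]
  constructor
  · rintro ⟨⟨⟨h1, h2⟩, h3⟩, h4⟩
    exact ⟨by exact_mod_cast h1, h2, by exact_mod_cast h3, h4⟩
  · rintro ⟨h1, h2, h3, h4⟩
    exact ⟨⟨⟨by exact_mod_cast h1, h2⟩, by exact_mod_cast h3⟩, h4⟩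

lemma innerA_eq_find? (s1 s2 : List Char) (i : Int) (g : List Char) (js : List Int) :
    innerA s1 s2 i g js =
      match js.find? (fun j => condA s1 s2 g i j) with
      | some j => PySem.List.slice s1 (some i) (some j)
      | none => g := by
  induction js with
  | nil => rfl
  | cons j js ih =>
      rw [innerA, List.find?_cons]
      by_cases h : condA s1 s2 g i j
      · simp [h]
      · simp only [h, Bool.false_eq_true, ite_false]
        simpa [h] using ih

-- what every successful update gives
lemma condN_qual {s1 s2 : List Char} {G i d : ℕ} (h : CondN s1 s2 G i d) (hd : 0 < d)
    (hin : i + d < s1.length) :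
    (s1.drop i).take d = s1.take d ∧ Qual s1 s2 d ∧ G < d ∧ FullP s1 (Nat.gcd i d) := by
  obtain ⟨hmod, hrep1, hG, hrep2⟩ := h
  have hlen : ((s1.drop i).take d).length = d := by
    simp [List.length_take, List.length_drop]; omega
  have hkpos : 0 < s1.length / d := Nat.div_pos (by omega) hd
  have hpre : (s1.drop i).take d = s1.take d := by
    have := prefix_of_rep _ _ _ hkpos hrep1
    rw [hlen] at this
    exact this
  have hq : Qual s1 s2 d := ⟨hd, by omega, hmod, by rw [← hpre]; exact hrep1, by rw [← hpre]; exact hrep2⟩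
  have hFd : FullP s1 d := ⟨hd, Nat.dvd_of_mod_eq_zero hmod, hq.2.2.2.1⟩
  exact ⟨hpre, hq, hG, pvRotation hFd hpre (by omega)⟩

-- the loop invariant at entry of row i
def INV (s1 s2 : List Char) (i : ℕ) (g : List Char) : Prop :=
  (g = [] ∧ (i = 0 ∨ ∀ d, ¬ Qual s1 s2 d)) ∨
  (∃ v, g = s1.take v ∧ Qual s1 s2 v ∧
    ((∃ q, Qual s1 s2 q ∧ v < q) →
      ∃ p i1, FullP s1 p ∧ p ∣ i1 ∧ i ≤ i1 ∧ i1 ≤ v))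

lemma qual_le_half {s1 s2 : List Char} {q : ℕ} (h : Qual s1 s2 q) : 2 * q ≤ s1.length := by
  obtain ⟨h0, hlt, hmod, -, -⟩ := h
  have hdvd : q ∣ s1.length := Nat.dvd_of_mod_eq_zero hmod
  obtain ⟨c, hc⟩ := hdvd
  have : 2 ≤ c := by nlinarith [hc, hlt]
  nlinarith

lemma rowStep_inv (s1 s2 : List Char) (i : ℕ) (g : List Char) (hi : i < s1.length)
    (hINV : INV s1 s2 i g) :
    INV s1 s2 (i + 1) (innerA s1 s2 (i : Int) g (PySem.List.pyRange ((i : Int) + 1) (s1.length : Int) 1)) := by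
  rw [innerA_eq_find?]
  -- a qualifying q visible from row i (with current length G) yields a passing j = i + q
  have hcond : ∀ q G, Qual s1 s2 q → G < q → i + q < s1.length →
      (s1.drop i).take q = s1.take q → G = g.length →
      condA s1 s2 g (i : Int) ((i : Int) + (q : Int)) = true := by
    intro q G hq hGq hin halign hG
    have hiff := condA_iff_condN s1 s2 g (i : Int) ((i : Int) + (q : Int)) (by positivity)
      (by have := hq.1; omega) (by omega)
    have e1 : ((i : Int) : Int).toNat = i := Int.toNat_natCast i
    have e2 : ((i : Int) + (q : Int)).toNat = i + q := by omega
    rw [hiff, e2, Int.toNat_natCast]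
    have e3 : i + q - i = q := by omega
    rw [e3]
    exact ⟨hq.2.2.1, by rw [halign]; exact hq.2.2.2.1, by omega,
      by rw [halign]; exact hq.2.2.2.2⟩
  cases hfind : (PySem.List.pyRange ((i : Int) + 1) (s1.length : Int) 1).find?
      (fun j => condA s1 s2 g (i : Int) j) with
  | none =>
      simp only
      have hnone := List.find?_eq_none.mp hfind
      rcases hINV with ⟨rfl, hA⟩ | ⟨v, rfl, hqv, himpl⟩
      · rcases hA with hi0 | hnoq
        · -- row 0: if anything qualifies, it is found; so nothing qualifies
          subst hi0
          left
          refine ⟨rfl, Or.inr fun d hd => ?_⟩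
          exact absurd (hcond d 0 hd hd.1 (by have := hd.2.1; omega)
              (by simp) rfl)
            (by
              have hmem2 : ((d : ℕ) : Int) ∈ PySem.List.pyRange (((0 : ℕ) : Int) + 1) (s1.length : Int) 1 := by
                rw [PySem.List.mem_pyRange_one]
                have h1 := hd.1
                have h2 := hd.2.1
                constructor
                · push_cast; omega
                · exact_mod_cast h2
              have h0 : (0 : ℤ) + (d : ℤ) = (d : ℤ) := by ring
              have := hnone _ hmem2
              simpa [h0] using this)
        · exact Or.inl ⟨rfl, Or.inr hnoq⟩
      · right
        refine ⟨v, rfl, hqv, fun hex => ?_⟩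
        obtain ⟨p, i1, hFp, hdvd, hge, hle⟩ := himpl hex
        rcases Nat.lt_or_ge i i1 with hlt | hge'
        · exact ⟨p, i1, hFp, hdvd, by omega, hle⟩
        · -- i1 = i: row i is fully visible and some q > v qualifies: find? cannot be none
          exfalso
          have hii : i1 = i := by omega
          subst hii
          obtain ⟨q, hq, hvq⟩ := hex
          have hq2 := qual_le_half hq
          have hvlen : v < s1.length := hqv.2.1
          have hin : i1 + q < s1.length := by omega
          have halign : (s1.drop i1).take q = s1.take q :=
            align_of_fullP hFp hdvd (by omega) q (by omega)
          have hGlen : (s1.take v).length = v := by simp; omega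
          have hCond := hcond q v hq hvq hin halign hGlen.symm
          have hmem2 : ((i1 : ℕ) : Int) + (q : ℕ) ∈ PySem.List.pyRange (((i1 : ℕ) : Int) + 1) (s1.length : Int) 1 := by
            rw [PySem.List.mem_pyRange_one]
            have := hq.1
            constructor
            · omega
            · omega
          exact absurd hCond (hnone _ hmem2)
  | some j =>
      simp only
      have hcA := List.find?_some hfind
      have hmem := List.mem_of_find?_eq_some hfind
      rw [PySem.List.mem_pyRange_one] at hmem
      have hij : (i : Int) < j := by omega
      have hjn : j ≤ (s1.length : Int) := by omega
      have hCN := (condA_iff_condN s1 s2 g (i : Int) j (by positivity) hij hjn).mp hcA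
      rw [Int.toNat_natCast] at hCN
      set D := j.toNat - i with hD
      have hD0 : 0 < D := by omega
      have hiD : i + D < s1.length := by omega
      obtain ⟨hpre, hq, hG, hFgcd⟩ := condN_qual hCN hD0 hiD
      have hslice : PySem.List.slice s1 (some ((i : ℕ) : ℤ)) (some j) = s1.take D := by
        obtain ⟨J, rfl⟩ := Int.eq_ofNat_of_zero_le (le_trans (by positivity) hij.le)
        rw [PySem.List.slice_natCast s1 i J]
        rw [show J - i = D by omega]
        exact hpre
      rw [hslice]
      right
      refine ⟨D, rfl, hq, fun hex => ?_⟩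
      -- a new future visible row for the (possible) next update
      rcases hINV with ⟨hg, hA⟩ | ⟨v0, hg, hqv0, himpl0⟩
      · -- g = [], so i = 0 (something qualifies now)
        have hi0 : i = 0 := by
          rcases hA with h | hnoq
          · exact h
          · exact absurd hq (hnoq D)
        refine ⟨D, D, ?_, dvd_rfl, by omega, le_rfl⟩
        rw [hi0] at hFgcd
        simpa [Nat.gcd_zero_left] using hFgcd
      · -- g = take v0; v0 < D; from the old invariant, i ≤ v0 < D
        have hv0len : v0 < s1.length := hqv0.2.1
        have hGv0 : g.length = v0 := by rw [hg]; simp; omega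
        have hv0D : v0 < D := by omega
        obtain ⟨p0, i10, hFp0, hdvd0, hge0, hle0⟩ := himpl0 ⟨D, hq, hv0D⟩
        have hiv0 : i ≤ v0 := by omega
        have hiDlt : i < D := by omega
        set p := Nat.gcd i D with hp
        have hpD : p ∣ D := Nat.gcd_dvd_right i D
        have hpi : p ∣ i := Nat.gcd_dvd_left i D
        have hppos : 0 < p := Nat.gcd_pos_of_pos_right i hD0
        have hpsub : p ∣ D - i := Nat.dvd_sub hpD hpi
        have hple : i + p ≤ D := by
          have := Nat.le_of_dvd (by omega) hpsub
          omega
        exact ⟨p, i + p, hFgcd, Dvd.dvd.add hpi dvd_rfl, by omega, hple⟩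

lemma check_fold_inv (s1 s2 : List Char) (i : ℕ) (hi : i ≤ s1.length) :
    INV s1 s2 i ((PySem.List.pyRange 0 (i : Int) 1).foldl
      (fun gcd k => innerA s1 s2 k gcd (PySem.List.pyRange (k + 1) (s1.length : Int) 1)) []) := by
  induction i with
  | zero =>
      have h0 : PySem.List.pyRange 0 ((0 : ℕ) : Int) 1 = [] :=
        PySem.List.pyRange_one_eq_nil (by simp)
      rw [h0]
      exact Or.inl ⟨rfl, Or.inl rfl⟩
  | succ i ih =>
      have h1 : ((i : ℕ) : Int) + 1 = (((i + 1 : ℕ)) : Int) := by push_cast; ring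
      rw [← h1, PySem.List.pyRange_one_succ_right (by positivity), List.foldl_append]
      simp only [List.foldl_cons, List.foldl_nil]
      exact rowStep_inv s1 s2 i _ (by omega) (ih (by omega))

lemma final_eq (s1 s2 : List Char) (g : List Char) (hINV : INV s1 s2 s1.length g) :
    g = s1.take (Nat.findGreatest (fun d => qualB s1 s2 d = true) (s1.length - 1)) := by
  rcases hINV with ⟨rfl, h⟩ | ⟨v, rfl, hqv, himpl⟩
  · suffices h2 : Nat.findGreatest (fun d => qualB s1 s2 d = true) (s1.length - 1) = 0 by
      rw [h2]; simp
    rw [Nat.findGreatest_eq_zero_iff]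
    intro n _ _ hq
    rcases h with h0 | hnoq
    · have hq' := (qualB_iff _ _ _).mp hq
      have h00 : s1.length = 0 := h0
      have := hq'.2.1
      omega
    · exact hnoq _ ((qualB_iff _ _ _).mp hq)
  · congr 1
    have hv1 : v ≤ s1.length - 1 := by have := hqv.2.1; omega
    have hle : v ≤ Nat.findGreatest (fun d => qualB s1 s2 d = true) (s1.length - 1) :=
      Nat.le_findGreatest hv1 ((qualB_iff _ _ _).mpr hqv)
    by_contra hne
    have hqM : Qual s1 s2 (Nat.findGreatest (fun d => qualB s1 s2 d = true) (s1.length - 1)) := by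
      apply (qualB_iff _ _ _).mp
      exact Nat.findGreatest_spec (P := fun d => qualB s1 s2 d = true) hv1
        ((qualB_iff _ _ _).mpr hqv)
    obtain ⟨p, i1, hFp, hdvd, hge, hle'⟩ := himpl ⟨_, hqM, by omega⟩
    have := hqv.2.1
    omega

-- ===== VERDICT (by name: the statement is the Claim_ definition above) =====
theorem check_spec : Claim_equal_check := by
  intro str1 str2 _
  unfold Spec_check check check_alt
  simp only
  congr 1
  have hA := check_fold_inv str1.toList str2.toList str1.toList.length le_rfl
  have hfin := final_eq str1.toList str2.toList _ hA
  rw [hfin]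
  by_cases h0 : str1.toList.length = 0
  · rw [h0]
    simp only [Nat.cast_zero, zero_sub]
    rw [PySem.List.pyRange_neg_one_eq_nil (by omega)]
    simp [loopB]
  · have h1 : ((str1.toList.length : Int) - 1) = (((str1.toList.length - 1 : ℕ)) : Int) := by
      omega
    rw [h1, loopB_eq_findGreatest _ _ _ (by omega)]
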